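-- pv_equiv track=rewrite | github.com/AP-MI-2021/lab-4-BordianuRaul | main.py | get_oglindite_daca_div
-- ===== SOURCE A (Python) =====
-- def get_oglindit(n):
--     """
--     Determina oglinditul unui numar
--     :param n: numarul
--     :return: oglinditul lui n
--     """
--
--     oglindit = 0
--     while n:
--         oglindit = oglindit * 10 + (n % 10)
--         n //= 10
--
--     return oglindit
--
-- def is_dividing(n, lista):
--     """
--     Verifica daca n se divide cu toate elementele din lista
--     :param n:
--     :param lista:
--     :return: True daca sse divide, False altfel
--     """
--
--     for divizor in lista:
--         if n % divizor != 0: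
--             return False
--     return True
--
-- def get_oglindite_daca_div(lista_1, lista_2, lista_3):
--
--     """
--     Determina toate elementele oglindite din primele 2 liste daca se divid cu toate elementele din a 3 a lista
--     :param lista_1:
--     :param lista_2:
--     :param lista_3:
--     :return: lista cu elemenetele oglindite
--     """
--
--     oglindit_list_1 = []
--     oglindit_list_2 = []
--
--     for element in range (0,len(lista_1)):
--         if is_dividing(element, lista_3):
--             oglindit = get_oglindit(element)
--             lista_1[element] = oglindit
--
--     for element in range(0, len(lista_2)):
--         if is_dividing(element, lista_3):
--             oglindit = get_oglindit(element)
--             lista_2[element] = oglindit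
--
--     return lista_1, lista_2
-- ===== SOURCE B (Python) =====
-- def get_oglindite_daca_div(lista_1, lista_2, lista_3):
--     # The qualifying indices are exactly the nonnegative multiples of
--     # L = lcm(|d| for d in lista_3)  (i % d == 0 iff |d| divides i), so enumerate
--     # them directly with a stride of L instead of testing every index against
--     # every divisor.  Once L exceeds n, only index 0 can qualify, so stop growing
--     # it.  Mutates lista_1/lista_2 in place like the original.
--     n = max(len(lista_1), len(lista_2))
--     L = 1
--     for d in lista_3:
--         d = abs(d)
--         g, r = L, d
--         while r:
--             g, r = r, g % r
--         L = 0 if g == 0 else L // g * d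
--         if L > n:
--             break
--     if L:
--         for i in range(0, n, L):
--             digs = []
--             k = i
--             while k:
--                 digs.append(k % 10)
--                 k //= 10
--             m = 0
--             for t in digs:
--                 m = m * 10 + t
--             if i < len(lista_1):
--                 lista_1[i] = m
--             if i < len(lista_2):
--                 lista_2[i] = m
--     return lista_1, lista_2
-- ===== Notes on version B (the rewrite author's own statement) =====
-- stated objective: alternative
-- what changed: B replaces A's per-index divisibility testing (every index of each list checked against every element of lista_3) by a number-theoretic enumeration: it computes L = lcm(|d| for d in lista_3) once with Euclid's algorithm (stopping early once L exceeds max(len1,len2), when only index 0 can qualify) and then strides directly over the qualifying indices range(0, max(len1,len2), L) in a single pass mutating both lists; the mirror is built by collecting the digit list and folding it.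
import Mathlib
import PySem

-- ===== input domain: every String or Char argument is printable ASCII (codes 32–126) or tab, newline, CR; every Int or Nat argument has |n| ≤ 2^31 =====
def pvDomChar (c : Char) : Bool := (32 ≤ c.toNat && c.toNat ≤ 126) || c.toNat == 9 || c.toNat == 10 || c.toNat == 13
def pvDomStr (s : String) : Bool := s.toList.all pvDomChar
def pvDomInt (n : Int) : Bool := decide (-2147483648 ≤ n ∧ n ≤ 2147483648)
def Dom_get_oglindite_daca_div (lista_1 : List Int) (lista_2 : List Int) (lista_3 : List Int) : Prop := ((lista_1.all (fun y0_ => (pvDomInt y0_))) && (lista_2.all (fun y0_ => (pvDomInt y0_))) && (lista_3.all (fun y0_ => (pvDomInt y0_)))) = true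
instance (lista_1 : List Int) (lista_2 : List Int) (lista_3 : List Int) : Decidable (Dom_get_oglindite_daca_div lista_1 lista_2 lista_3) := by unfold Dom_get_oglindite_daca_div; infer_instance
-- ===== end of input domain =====

-- B replaces A's per-index divisibility tests by striding over the multiples of
-- L = lcm(|d| for d in lista_3), growing L only until it exceeds the list lengths
-- (objective: alternative algorithm). Both A and B mutate lista_1/lista_2 in place
-- in Python; the equivalence proved is about the return value.

-- ===== PORT A =====
-- A's `while n:` digit loop; exact for n ≥ 0, which covers every call site (n is a list index).
def get_oglindit_go (n : Nat) (acc : Int) : Int :=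
  if h : n = 0 then acc
  else get_oglindit_go (n / 10) (acc * 10 + ((n % 10 : Nat) : Int))
  decreasing_by exact Nat.div_lt_self (Nat.pos_of_ne_zero h) (by omega)

def get_oglindit (n : Int) : Int := get_oglindit_go n.toNat 0

def is_dividing (n : Int) (lista : List Int) : Bool :=
  lista.all (fun divizor => PySem.Int.mod n divizor == 0)

-- range(0, len(lista)) yields the indices 0..len-1; lista[element] = x is List.set (index always in range).
def get_oglindite_daca_div (lista_1 : List Int) (lista_2 : List Int) (lista_3 : List Int) : List Int × List Int :=
  let l1 := (List.range lista_1.length).foldl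
    (fun (acc : List Int) (element : Nat) => if is_dividing (element : Int) lista_3 then acc.set element (get_oglindit (element : Int)) else acc) lista_1
  let l2 := (List.range lista_2.length).foldl
    (fun (acc : List Int) (element : Nat) => if is_dividing (element : Int) lista_3 then acc.set element (get_oglindit (element : Int)) else acc) lista_2
  (l1, l2)

-- ===== PORT B =====
-- B's `while r: g, r = r, g % r` Euclid loop; values are the nonnegative L and abs(d).
def pvGcdLoop (g r : Nat) : Nat :=
  if h : r = 0 then g
  else pvGcdLoop r (g % r)
  decreasing_by exact Nat.mod_lt _ (Nat.pos_of_ne_zero h)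

-- B's `L = 0 if g == 0 else L // g * d` step
def pvLcmStep (L d : Nat) : Nat :=
  let g := pvGcdLoop L d
  if g = 0 then 0 else L / g * d

-- B's inner digit collection (`digs`) followed by the fold `m = m*10 + t`.
def pvDigs (k : Nat) : List Int :=
  if h : k = 0 then []
  else ((k % 10 : Nat) : Int) :: pvDigs (k / 10)
  decreasing_by exact Nat.div_lt_self (Nat.pos_of_ne_zero h) (by omega)

def pvMirror (i : Nat) : Int := (pvDigs i).foldl (fun m d => m * 10 + d) 0

-- B's `for d in lista_3` loop updating L, with the `if L > n: break` early exit.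
def pvLcmLoop (n : Nat) : List Int → Nat → Nat
  | [], L => L
  | d :: rest, L =>
    let L' := pvLcmStep L d.natAbs
    if L' > n then L' else pvLcmLoop n rest L'

-- `for i in range(0, n, L)` is PySem.List.pyRange 0 n L; its elements are nonnegative,
-- so `lista[i] = m` is List.set i.toNat after the Int comparison i < len.
def get_oglindite_daca_div_alt (lista_1 : List Int) (lista_2 : List Int) (lista_3 : List Int) : List Int × List Int :=
  let n := max lista_1.length lista_2.length
  let L : Nat := pvLcmLoop n lista_3 1
  if L ≠ 0 then
    (PySem.List.pyRange 0 (n : Int) (L : Int)).foldl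
      (fun (p : List Int × List Int) (i : Int) =>
        (if i < (lista_1.length : Int) then p.1.set i.toNat (pvMirror i.toNat) else p.1,
         if i < (lista_2.length : Int) then p.2.set i.toNat (pvMirror i.toNat) else p.2))
      (lista_1, lista_2)
  else (lista_1, lista_2)

-- ===== PRECONDITION & SPEC =====
-- Excluded: inputs where A raises ZeroDivisionError (0 ∈ lista_3 while some of the first two lists is non-empty).
def Pre_get_oglindite_daca_div (lista_1 : List Int) (lista_2 : List Int) (lista_3 : List Int) : Prop :=
  (0 : Int) ∈ lista_3 → lista_1 = [] ∧ lista_2 = []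
instance (lista_1 : List Int) (lista_2 : List Int) (lista_3 : List Int) : Decidable (Pre_get_oglindite_daca_div lista_1 lista_2 lista_3) := by unfold Pre_get_oglindite_daca_div; infer_instance

def pvWitness_get_oglindite_daca_div : List Int × List Int × List Int := ([4, 5, 6], [7], [2, 3])

def Spec_get_oglindite_daca_div (lista_1 : List Int) (lista_2 : List Int) (lista_3 : List Int) (out : List Int × List Int) : Prop := out = get_oglindite_daca_div_alt lista_1 lista_2 lista_3
instance (lista_1 : List Int) (lista_2 : List Int) (lista_3 : List Int) (out : List Int × List Int) : Decidable (Spec_get_oglindite_daca_div lista_1 lista_2 lista_3 out) := by unfold Spec_get_oglindite_daca_div; infer_instance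

-- ===== CLAIM (what is proved, stated in full; the proofs are below) =====
def Claim_equal_get_oglindite_daca_div : Prop := ∀ (lista_1 : List Int) (lista_2 : List Int) (lista_3 : List Int), Dom_get_oglindite_daca_div lista_1 lista_2 lista_3 → Pre_get_oglindite_daca_div lista_1 lista_2 lista_3 → Spec_get_oglindite_daca_div lista_1 lista_2 lista_3 (get_oglindite_daca_div lista_1 lista_2 lista_3)

-- ===== LEMMAS AND PROOFS =====

-- B's Euclid loop is Nat.gcd (arguments swapped).
theorem pvGcdLoop_eq (g r : Nat) : pvGcdLoop g r = Nat.gcd r g := by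
  fun_induction pvGcdLoop g r with
  | case1 g => simp
  | case2 g r hne ih => rw [ih]; exact (Nat.gcd_rec r g).symm

-- B's lcm step is Nat.lcm.
theorem pvLcmStep_eq (L d : Nat) : pvLcmStep L d = Nat.lcm L d := by
  unfold pvLcmStep
  rw [pvGcdLoop_eq, Nat.gcd_comm]
  by_cases h : Nat.gcd L d = 0
  · have h1 := Nat.eq_zero_of_gcd_eq_zero_left h
    have h2 := Nat.eq_zero_of_gcd_eq_zero_right h
    simp [h1, h2, Nat.lcm]
  · rw [if_neg h, Nat.lcm]
    have hg : 0 < Nat.gcd L d := Nat.pos_of_ne_zero h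
    obtain ⟨c, hc⟩ := Nat.gcd_dvd_left L d
    set g := Nat.gcd L d with hgdef
    rw [hc, Nat.mul_div_cancel_left c hg, Nat.mul_assoc, Nat.mul_div_cancel_left _ hg]

-- the L computed by B
def pvL (lista_3 : List Int) : Nat := lista_3.foldl (fun L d => Nat.lcm L d.natAbs) 1

-- the accumulator divides the final lcm fold
theorem dvd_foldl_lcm (l : List Int) : ∀ (a : Nat), a ∣ l.foldl (fun x d => Nat.lcm x d.natAbs) a := by
  induction l with
  | nil => intro a; exact dvd_refl a
  | cons d rest ih =>
    intro a
    simp only [List.foldl_cons]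
    exact dvd_trans (Nat.dvd_lcm_left _ _) (ih _)

-- B's early-exit loop returns either the full lcm fold, or a divisor of it that exceeds n
theorem pvLcmLoop_dvd (n : Nat) (l : List Int) : ∀ (L : Nat),
    pvLcmLoop n l L ∣ l.foldl (fun x d => Nat.lcm x d.natAbs) L ∧
      (n < pvLcmLoop n l L ∨ pvLcmLoop n l L = l.foldl (fun x d => Nat.lcm x d.natAbs) L) := by
  induction l with
  | nil => intro L; exact ⟨dvd_refl L, Or.inr rfl⟩
  | cons d rest ih =>
    intro L
    simp only [pvLcmLoop, pvLcmStep_eq, List.foldl_cons]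
    by_cases hgt : Nat.lcm L d.natAbs > n
    · rw [if_pos hgt]
      exact ⟨dvd_foldl_lcm rest _, Or.inl hgt⟩
    · rw [if_neg hgt]
      exact ih _

theorem pvLcmLoop_one (n : Nat) (l : List Int) :
    pvLcmLoop n l 1 ∣ pvL l ∧ (n < pvLcmLoop n l 1 ∨ pvLcmLoop n l 1 = pvL l) := by
  unfold pvL; exact pvLcmLoop_dvd n l 1

theorem pvLcmLoop_pos (n : Nat) (l : List Int) (h0 : ∀ d ∈ l, d ≠ 0) : ∀ L, 0 < L →
    0 < pvLcmLoop n l L := by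
  induction l with
  | nil => intro L hL; exact hL
  | cons d rest ih =>
    intro L hL
    have hlcm : 0 < Nat.lcm L d.natAbs :=
      Nat.lcm_pos hL (Int.natAbs_pos.mpr (h0 d (by simp)))
    simp only [pvLcmLoop, pvLcmStep_eq]
    by_cases hgt : Nat.lcm L d.natAbs > n
    · rw [if_pos hgt]; exact hlcm
    · rw [if_neg hgt]
      exact ih (fun d hd => h0 d (by simp [hd])) _ hlcm

-- the early-exit L selects the same indices below n as the full lcm
theorem filter_dvd_congr (n R P : Nat) (hdvd : R ∣ P) (h : n ≤ R ∨ R = P) :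
    (List.range n).filter (fun i => decide (R ∣ i)) = (List.range n).filter (fun i => decide (P ∣ i)) := by
  cases h with
  | inr h => subst h; rfl
  | inl h =>
    apply List.filter_congr
    intro i hi
    simp only [List.mem_range] at hi
    simp only [decide_eq_decide]
    constructor
    · intro hRi
      have hz : i = 0 := Nat.eq_zero_of_dvd_of_lt hRi (lt_of_lt_of_le hi h)
      exact hz ▸ Dvd.intro 0 rfl
    · exact fun hPi => hdvd.trans hPi

-- lcm-fold divisibility characterisation
theorem pvL_dvd_iff (lista_3 : List Int) (i : Nat) :
    (pvL lista_3 ∣ i) ↔ ∀ d ∈ lista_3, d.natAbs ∣ i := by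
  unfold pvL
  have key : ∀ (l : List Int) (acc : Nat),
      (l.foldl (fun L d => Nat.lcm L d.natAbs) acc ∣ i) ↔
        (acc ∣ i ∧ ∀ d ∈ l, d.natAbs ∣ i) := by
    intro l
    induction l with
    | nil => simp
    | cons x xs ih =>
      intro acc
      simp only [List.foldl_cons, ih, Nat.lcm_dvd_iff, List.mem_cons]
      constructor
      · rintro ⟨⟨h1, h2⟩, h3⟩
        exact ⟨h1, fun d hd => hd.elim (fun he => he ▸ h2) (h3 d)⟩
      · rintro ⟨h1, h2⟩
        exact ⟨⟨h1, h2 x (Or.inl rfl)⟩, fun d hd => h2 d (Or.inr hd)⟩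
  simpa using key lista_3 1

-- A's condition is "pvL divides the index" (holds for every lista_3).
theorem is_dividing_eq (lista_3 : List Int) (i : Nat) :
    is_dividing (i : Int) lista_3 = decide (pvL lista_3 ∣ i) := by
  have hiff : ∀ d : Int, d ∣ (i : Int) ↔ d.natAbs ∣ i := by
    intro d
    rw [← Int.natAbs_dvd_natAbs, Int.natAbs_natCast]
  rw [Bool.eq_iff_iff]
  simp only [is_dividing, List.all_eq_true, beq_iff_eq, PySem.Int.mod_eq_zero_iff_dvd,
    decide_eq_true_eq, pvL_dvd_iff, hiff]

-- A's accumulator loop equals B's "collect digits, then fold" mirror.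
theorem get_oglindit_go_eq_digs (n : Nat) (acc : Int) :
    get_oglindit_go n acc = (pvDigs n).foldl (fun m d => m * 10 + d) acc := by
  fun_induction get_oglindit_go n acc with
  | case1 => simp_all [pvDigs]
  | case2 => rename_i n acc h ih; rw [pvDigs, ih]; simp [h]

theorem get_oglindit_eq_mirror (i : Nat) : get_oglindit (i : Int) = pvMirror i := by
  simp [get_oglindit, pvMirror, get_oglindit_go_eq_digs]

-- range(0, n, L) with L > 0 enumerates exactly the multiples of L below n.
theorem pyRange_step_eq_filter (L n : Nat) (hL : 0 < L) :
    PySem.List.pyRange 0 (n : Int) (L : Int)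
      = ((List.range n).filter (fun i => decide (L ∣ i))).map (fun i : Nat => (i : Int)) := by
  have hLi : (0 : Int) < (L : Int) := by exact_mod_cast hL
  have hp1 : (PySem.List.pyRange 0 (n : Int) (L : Int)).Pairwise (· < ·) := by
    rw [PySem.List.pyRange_of_pos _ _ hLi]
    refine List.Pairwise.map _ ?_ (List.pairwise_lt_range)
    intro a b hab
    have : (a : Int) < b := by exact_mod_cast hab
    simp only [zero_add]
    nlinarith
  have hp2 : (((List.range n).filter (fun i => decide (L ∣ i))).map (fun i : Nat => (i : Int))).Pairwise (· < ·) := by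
    refine List.Pairwise.map _ (fun a b h => by exact_mod_cast h)
      (List.Pairwise.filter _ List.pairwise_lt_range)
  have hmem : ∀ x : Int, x ∈ PySem.List.pyRange 0 (n : Int) (L : Int) ↔
      x ∈ ((List.range n).filter (fun i => decide (L ∣ i))).map (fun i : Nat => (i : Int)) := by
    intro x
    rw [PySem.List.mem_pyRange_iff_of_pos hLi]
    simp only [List.mem_map, List.mem_filter, List.mem_range, decide_eq_true_eq]
    constructor
    · rintro ⟨h0, hn, hd⟩
      refine ⟨x.toNat, ⟨by omega, ?_⟩, by omega⟩
      have hdx : (L : Int) ∣ x := by simpa using hd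
      rw [← Int.natAbs_dvd_natAbs, Int.natAbs_natCast] at hdx
      have hna : x.natAbs = x.toNat := by omega
      rwa [hna] at hdx
    · rintro ⟨k, ⟨hk, hdk⟩, rfl⟩
      refine ⟨by positivity, by exact_mod_cast hk, ?_⟩
      simpa using (Int.natCast_dvd_natCast.mpr hdk : (L : Int) ∣ (k : Int))
  exact List.Perm.eq_of_pairwise (fun a b _ _ h1 h2 => absurd h2 (by omega)) hp1 hp2
    ((List.perm_ext_iff_of_nodup (hp1.imp fun h => by omega) (hp2.imp fun h => by omega)).mpr hmem)

-- the body of B's strided pass, per list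
def pvApply (len : Nat) (mir : Nat → Int) (a : List Int) (i : Nat) : List Int :=
  if i < len then a.set i (mir i) else a

-- the per-list fold over range n (n ≥ L) with the "i < L" guard equals A's fold over range L
theorem foldl_range_guard (P : Nat → Bool) (mir : Nat → Int) (L : Nat) :
    ∀ (n : Nat), L ≤ n → ∀ (acc : List Int),
    (List.range n).foldl (fun a i => if P i then pvApply L mir a i else a) acc
      = (List.range L).foldl (fun a i => if P i then pvApply L mir a i else a) acc := by
  intro n
  induction n with
  | zero => intro h acc; rw [Nat.le_zero.mp h]
  | succ m ih =>
    intro h acc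
    by_cases hm : L ≤ m
    · rw [List.range_succ, List.foldl_append, ih hm]
      have : ¬ m < L := by omega
      simp [pvApply, this]
    · have : L = m + 1 := by omega
      subst this; rfl

theorem foldl_range_drop_guard (P : Nat → Bool) (mir : Nat → Int) (L : Nat) :
    ∀ (M : Nat), M ≤ L → ∀ (acc : List Int),
    (List.range M).foldl (fun a i => if P i then pvApply L mir a i else a) acc
      = (List.range M).foldl (fun a i => if P i then a.set i (mir i) else a) acc := by
  intro M
  induction M with
  | zero => intro _ _; rfl
  | succ m ih =>
    intro h acc
    rw [List.range_succ, List.foldl_append, List.foldl_append, ih (by omega)]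
    have : m < L := by omega
    simp [pvApply, this]

theorem per_list (P : Nat → Bool) (mir : Nat → Int) (l : List Int) (n : Nat) (hn : l.length ≤ n) :
    ((List.range n).filter P).foldl (pvApply l.length mir) l
      = (List.range l.length).foldl (fun a i => if P i then a.set i (mir i) else a) l := by
  rw [List.foldl_filter]
  rw [foldl_range_guard P mir l.length n hn l]
  exact foldl_range_drop_guard P mir l.length l.length (le_refl _) l

theorem get_oglindite_daca_div_eq (lista_1 lista_2 lista_3 : List Int)
    (h : (0 : Int) ∉ lista_3) :
    get_oglindite_daca_div lista_1 lista_2 lista_3 = get_oglindite_daca_div_alt lista_1 lista_2 lista_3 := by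
  have hR : 0 < pvLcmLoop (max lista_1.length lista_2.length) lista_3 1 :=
    pvLcmLoop_pos _ lista_3 (fun d hd hd0 => h (hd0 ▸ hd)) 1 (by omega)
  obtain ⟨hdvd, hcase⟩ := pvLcmLoop_one (max lista_1.length lista_2.length) lista_3
  unfold get_oglindite_daca_div get_oglindite_daca_div_alt
  dsimp only
  rw [if_pos (by omega : pvLcmLoop (max lista_1.length lista_2.length) lista_3 1 ≠ 0)]
  rw [pyRange_step_eq_filter _ _ hR]
  rw [filter_dvd_congr _ _ (pvL lista_3) hdvd (hcase.imp (fun h' => by omega) id)]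
  rw [List.foldl_map]
  have hbody : (fun (p : List Int × List Int) (i : Nat) =>
      (if (i : Int) < (lista_1.length : Int) then p.1.set (i : Int).toNat (pvMirror (i : Int).toNat) else p.1,
       if (i : Int) < (lista_2.length : Int) then p.2.set (i : Int).toNat (pvMirror (i : Int).toNat) else p.2))
      = (fun (p : List Int × List Int) (i : Nat) =>
      (pvApply lista_1.length pvMirror p.1 i, pvApply lista_2.length pvMirror p.2 i)) := by
    funext p i
    have h1 : ((i : Int) < (lista_1.length : Int)) ↔ i < lista_1.length := by exact_mod_cast Iff.rfl
    have h2 : ((i : Int) < (lista_2.length : Int)) ↔ i < lista_2.length := by exact_mod_cast Iff.rfl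
    simp [pvApply, h1, h2]
  rw [hbody]
  rw [PySem.List.foldl_prod_mk]
  refine Prod.ext ?_ ?_
  · rw [per_list _ _ _ _ (le_max_left lista_1.length lista_2.length)]
    simp [is_dividing_eq, get_oglindit_eq_mirror]
  · rw [per_list _ _ _ _ (le_max_right lista_1.length lista_2.length)]
    simp [is_dividing_eq, get_oglindit_eq_mirror]

-- ===== VERDICT (by name: the statement is the Claim_ definition above) =====
theorem get_oglindite_daca_div_spec : Claim_equal_get_oglindite_daca_div := by
  intro l1 l2 l3 _ hpre
  unfold Spec_get_oglindite_daca_div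
  by_cases h : (0 : Int) ∈ l3
  · obtain ⟨h1, h2⟩ := hpre h
    subst h1; subst h2
    unfold get_oglindite_daca_div get_oglindite_daca_div_alt
    dsimp only [List.length_nil, Nat.max_self, Nat.max_zero, List.range_zero, List.foldl_nil, Nat.cast_zero]
    by_cases hL : pvLcmLoop (max 0 0) l3 1 = 0
    · have hL0 : pvLcmLoop 0 l3 1 = 0 := by simpa using hL
      simp [hL0]
    · have hpos : (0 : Int) < ((pvLcmLoop (max 0 0) l3 1 : Nat) : Int) := by
        exact_mod_cast Nat.pos_of_ne_zero hL
      rw [if_pos hL, PySem.List.pyRange_of_pos _ _ hpos]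
      simp
  · exact get_oglindite_daca_div_eq l1 l2 l3 h
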